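-- pv_equiv track=rewrite | github.com/uorwinnie/weekend-git | assignment/Jan15_assignment.py | bigger_sum
-- ===== SOURCE A (Python) =====
-- def bigger_sum(a,b,c):
--   empty=[]
--   for i in a,b,c:
--     empty.append(i)
--   lar=max(empty)
--   empty.remove(lar)
--   sec_lar=max(empty)
--   result=(lar**2)+(sec_lar**2)
--   return result
-- ===== SOURCE B (Python) =====
-- def bigger_sum(a, b, c):
--     return a * a + b * b + c * c - min(a, b, c) ** 2
-- ===== Notes on version B (the rewrite author's own statement) =====
-- stated objective: simpler
-- what changed: Replaced the build-list / max / remove / max selection with the closed-form identity: sum of all three squares minus the square of the minimum.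
import Mathlib
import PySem

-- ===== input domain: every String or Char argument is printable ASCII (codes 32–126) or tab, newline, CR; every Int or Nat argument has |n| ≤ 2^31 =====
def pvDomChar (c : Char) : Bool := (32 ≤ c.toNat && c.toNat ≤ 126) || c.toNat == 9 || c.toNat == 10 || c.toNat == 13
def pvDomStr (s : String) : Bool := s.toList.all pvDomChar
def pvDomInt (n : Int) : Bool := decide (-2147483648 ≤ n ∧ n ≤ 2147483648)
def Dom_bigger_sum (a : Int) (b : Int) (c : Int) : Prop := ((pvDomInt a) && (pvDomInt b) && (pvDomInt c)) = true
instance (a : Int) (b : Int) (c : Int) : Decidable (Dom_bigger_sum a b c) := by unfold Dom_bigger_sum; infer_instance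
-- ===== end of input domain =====

-- B replaces A's build-list / max / remove / max selection with the closed form
-- a*a + b*b + c*c - min(a,b,c)**2 (objective: simpler; same value on all inputs).

-- ===== PORT A =====
-- empty = []; append a, b, c; lar = max(empty); empty.remove(lar); sec_lar = max(empty);
-- result = lar**2 + sec_lar**2.  The none branches are unreachable (the lists are nonempty
-- and lar ∈ empty), matching that Python A never raises.
def bigger_sum (a : Int) (b : Int) (c : Int) : Int :=
  let empty : List Int := (([] ++ [a]) ++ [b]) ++ [c]
  match PySem.List.max? empty (fun x => x) with
  | none => 0
  | some lar =>
    match PySem.List.remove? empty lar with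
    | none => 0
    | some rest =>
      match PySem.List.max? rest (fun x => x) with
      | none => 0
      | some sec_lar => lar ^ 2 + sec_lar ^ 2

-- ===== PORT B =====
def bigger_sum_alt (a : Int) (b : Int) (c : Int) : Int :=
  a * a + b * b + c * c - (min a (min b c)) ^ 2

-- ===== PRECONDITION & SPEC =====
def Spec_bigger_sum (a : Int) (b : Int) (c : Int) (out : Int) : Prop := out = bigger_sum_alt a b c
instance (a : Int) (b : Int) (c : Int) (out : Int) : Decidable (Spec_bigger_sum a b c out) := by unfold Spec_bigger_sum; infer_instance

-- ===== CLAIM (what is proved, stated in full; the proofs are below) =====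
def Claim_equal_bigger_sum : Prop := ∀ (a : Int) (b : Int) (c : Int), Dom_bigger_sum a b c → Spec_bigger_sum a b c (bigger_sum a b c)

-- ===== LEMMAS AND PROOFS =====

-- ===== VERDICT (by name: the statement is the Claim_ definition above) =====
theorem bigger_sum_spec : Claim_equal_bigger_sum := by
  intro a b c _
  unfold Spec_bigger_sum bigger_sum bigger_sum_alt
  simp only [List.nil_append, List.cons_append, PySem.List.max?, PySem.List.remove?,
    List.foldl_cons, List.foldl_nil, List.idxOf?, List.findIdx?, List.findIdx?.go, Option.map]
  by_cases hab : a = b <;> by_cases hac : a = c <;> by_cases hbc : b = c <;>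
    repeat'
      first
        | split_ifs
        | simp_all [List.findIdx?.go, List.eraseIdx, min_def, beq_iff_eq]
  all_goals first | ring1 | omega | (exfalso; omega)
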